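-- pv_equiv track=rewrite | github.com/atlytle/soton_qcd | measurements.py | JKsample
-- ===== SOURCE A (Python) =====
-- def JKsample(list):
--     '''Yield the jackknife samples of the elements in list.'''
--     sample = []
--     for dummy in range(len(list)):
--         x, xs = list[0], list[1:]
--         sample.append(xs[:])
--         xs.append(x)
--         list = xs
--     return sample
-- ===== SOURCE B (Python) =====
-- def JKsample(list):
--     '''Yield the jackknife samples of the elements in list.'''
--     return [list[i+1:] + list[:i] for i in range(len(list))]
-- ===== Notes on version B (the rewrite author's own statement) =====
-- stated objective: simpler
-- what changed: Replaces the stateful rotate-and-peel loop (mutable rotating list, appended accumulator) by a direct closed-form comprehension computing each jackknife sample from its index as list[i+1:] + list[:i]; no state is carried across iterations.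
import Mathlib
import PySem

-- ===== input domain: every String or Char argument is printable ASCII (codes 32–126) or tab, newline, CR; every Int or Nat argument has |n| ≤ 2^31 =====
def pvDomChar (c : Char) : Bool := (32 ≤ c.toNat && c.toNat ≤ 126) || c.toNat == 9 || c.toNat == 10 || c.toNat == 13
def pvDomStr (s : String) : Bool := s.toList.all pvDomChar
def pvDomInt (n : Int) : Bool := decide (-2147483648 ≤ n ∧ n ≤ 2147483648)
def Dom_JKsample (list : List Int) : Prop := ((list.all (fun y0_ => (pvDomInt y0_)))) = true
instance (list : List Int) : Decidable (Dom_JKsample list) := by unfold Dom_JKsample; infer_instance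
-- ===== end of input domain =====

-- B replaces A's rotate-and-peel loop with a stateless slice comprehension (objective: simpler).

-- ===== PORT A =====
-- loop body: x, xs = list[0], list[1:]; sample.append(xs[:]); xs.append(x); list = xs
-- list[0] is ported with pyGet? ... .getD 0; inside the loop the list is always nonempty
-- (the loop runs len(list) times and the list keeps its length), so the default is never used.
def JKsample (list : List Int) : List (List Int) :=
  ((PySem.List.pyRange 0 (list.length : Int) 1).foldl
    (fun (st : List Int × List (List Int)) _ =>
      let x := (PySem.List.pyGet? st.1 0).getD 0
      let xs := PySem.List.slice st.1 (some 1) none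
      (xs ++ [x], st.2 ++ [xs]))
    (list, [])).2

-- ===== PORT B =====
-- [list[i+1:] + list[:i] for i in range(len(list))]
def JKsample_alt (list : List Int) : List (List Int) :=
  (PySem.List.pyRange 0 (list.length : Int) 1).map
    (fun i => PySem.List.slice list (some (i + 1)) none ++ PySem.List.slice list none (some i))

-- ===== PRECONDITION & SPEC =====
def Spec_JKsample (list : List Int) (out : List (List Int)) : Prop := out = JKsample_alt list
instance (list : List Int) (out : List (List Int)) : Decidable (Spec_JKsample list out) := by unfold Spec_JKsample; infer_instance

-- ===== CLAIM (what is proved, stated in full; the proofs are below) =====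
def Claim_equal_JKsample : Prop := ∀ (list : List Int), Dom_JKsample list → Spec_JKsample list (JKsample list)

-- ===== LEMMAS AND PROOFS =====

/-- A's loop body as a function of the state. -/
def stepA (st : List Int × List (List Int)) : List Int × List (List Int) :=
  let x := (PySem.List.pyGet? st.1 0).getD 0
  let xs := PySem.List.slice st.1 (some 1) none
  (xs ++ [x], st.2 ++ [xs])

/-- The list after k iterations of A's loop: the original rotated left by k. -/
def rot (l : List Int) (k : Nat) : List Int := l.drop k ++ l.take k

/-- The k-th jackknife sample. -/
def samp (l : List Int) (k : Nat) : List Int := l.drop (k + 1) ++ l.take k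

lemma foldl_ignore {α β : Type} (f : α → α) :
    ∀ (xs : List β) (s : α), xs.foldl (fun a _ => f a) s = f^[xs.length] s := by
  intro xs
  induction xs with
  | nil => simp
  | cons b bs ih =>
    intro s
    simp [List.foldl, ih, Function.iterate_succ_apply]

lemma stepA_rot (l : List Int) (k : Nat) (acc : List (List Int)) (hk : k < l.length) :
    stepA (rot l k, acc) = (rot l (k + 1), acc ++ [samp l k]) := by
  have hd : l.drop k ≠ [] := by
    simp [List.drop_eq_nil_iff]; omega
  have hget : (l.drop k ++ l.take k)[0]? = l[k]? := by
    rw [List.getElem?_append_left (by simp; omega)]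
    simp [List.getElem?_drop]
  have htail : (l.drop k ++ l.take k).tail = l.drop (k + 1) ++ l.take k := by
    rw [List.tail_append_of_ne_nil hd, List.tail_drop]
  simp only [stepA, rot, samp, PySem.List.slice_from_one, htail, Prod.mk.injEq]
  refine ⟨?_, trivial⟩
  -- rotated list: drop (k+1) ++ take k ++ [l[k]] = drop (k+1) ++ take (k+1)
  have hx : (PySem.List.pyGet? (l.drop k ++ l.take k) 0).getD 0 = l[k] := by
    rw [PySem.List.pyGet?_zero, hget, List.getElem?_eq_getElem hk]; rfl
  rw [hx, List.append_assoc]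
  congr 1
  rw [List.take_add_one, List.getElem?_eq_getElem hk]
  simp

lemma iter_inv (l : List Int) :
    ∀ (n k : Nat) (acc : List (List Int)), k + n = l.length →
      (stepA^[n] (rot l k, acc)).2 = acc ++ (List.range' k n).map (samp l) := by
  intro n
  induction n with
  | zero => intro k acc _; simp
  | succ m ih =>
    intro k acc hkn
    rw [Function.iterate_succ_apply, stepA_rot l k acc (by omega)]
    rw [ih (k + 1) _ (by omega)]
    simp [List.range'_succ]

lemma JKsample_eq (l : List Int) :
    JKsample l = (List.range l.length).map (samp l) := by
  have hfold : JKsample l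
      = ((PySem.List.pyRange 0 (l.length : Int) 1).foldl (fun st _ => stepA st) (l, [])).2 := rfl
  rw [hfold, foldl_ignore stepA]
  have hlen : (PySem.List.pyRange 0 (l.length : Int) 1).length = l.length := by
    simp [PySem.List.length_pyRange_one]
  rw [hlen]
  have h0 : rot l 0 = l := by simp [rot]
  have h := iter_inv l l.length 0 [] (by omega)
  rw [h0] at h
  rw [h]
  simp [List.range_eq_range']

lemma JKsample_alt_eq (l : List Int) :
    JKsample_alt l = (List.range l.length).map (samp l) := by
  simp only [JKsample_alt]
  rw [PySem.List.pyRange_one]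
  simp only [Int.sub_zero, Int.toNat_natCast, List.map_map]
  apply List.map_congr_left
  intro k hk
  simp only [Function.comp, samp]
  have h1 : (0 : Int) + (k : Int) + 1 = ((k + 1 : Nat) : Int) := by push_cast; ring
  have h2 : (0 : Int) + (k : Int) = ((k : Nat) : Int) := by push_cast; ring
  rw [h1, h2, PySem.List.slice_from_natCast, PySem.List.slice_to_natCast]

-- ===== VERDICT (by name: the statement is the Claim_ definition above) =====
theorem JKsample_spec : Claim_equal_JKsample := by
  intro l _
  unfold Spec_JKsample
  rw [JKsample_eq, JKsample_alt_eq]
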